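-- pv_equiv track=rewrite | github.com/Esha0011/PYTHON | HillServer.py | textToMatrix
-- ===== SOURCE A (Python) =====
-- def textToMatrix(n, text):
--     l2 = []
--     for i in range(n):
--         l = []
--         for j in range(len(text)):
--             if (j % n == i): l.append(text[j])
--         l2.append(l)
--     return l2
-- ===== SOURCE B (Python) =====
-- def textToMatrix(n, text):
--     if n <= 0:
--         return []
--     rows = [[] for _ in range(n)]
--     for j, ch in enumerate(text):
--         rows[j % n].append(ch)
--     return rows
-- ===== Notes on version B (the rewrite author's own statement) =====
-- stated objective: faster
-- what changed: Replaces the n passes over the text (one filtered scan per row) by a single enumerate pass that appends each character directly to bucket j % n.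
import Mathlib
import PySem

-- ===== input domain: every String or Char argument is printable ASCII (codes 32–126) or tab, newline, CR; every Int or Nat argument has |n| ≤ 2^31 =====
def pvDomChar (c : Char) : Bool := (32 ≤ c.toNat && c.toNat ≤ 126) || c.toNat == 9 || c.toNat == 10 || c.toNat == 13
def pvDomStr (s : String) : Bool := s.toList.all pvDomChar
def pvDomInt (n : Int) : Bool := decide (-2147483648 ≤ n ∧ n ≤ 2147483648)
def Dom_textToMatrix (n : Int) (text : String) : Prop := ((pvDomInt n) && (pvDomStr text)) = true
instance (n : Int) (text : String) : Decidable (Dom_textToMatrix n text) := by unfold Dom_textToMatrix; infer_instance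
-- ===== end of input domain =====

-- B replaces A's n filtered passes over the text by one enumerate pass appending each char to bucket j % n (asymptotically faster).


-- ===== PORT A =====
-- for i in range(n): for j in range(len(text)): if j % n == i: l.append(text[j])
-- (text[j] via PySem.Str.pyGet?; j is always in range here, so .getD "" is never the fallback)
def textToMatrix (n : Int) (text : String) : List (List String) :=
  (PySem.List.pyRange 0 n 1).foldl (fun l2 i =>
    l2 ++ [(PySem.List.pyRange 0 (PySem.Str.len text) 1).foldl
      (fun l j => if PySem.Int.mod j n == i
                  then l ++ [((PySem.Str.pyGet? text j).map (fun c => String.ofList [c])).getD ""]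
                  else l) []]) []

-- ===== PORT B =====
-- the single pass: rows[j % n].append(ch) for (j, ch) in enumerate(text)
def pvFillRows (n : Int) : List (Int × Char) → List (List String) → List (List String)
  | [], rows => rows
  | (j, c) :: rest, rows =>
      pvFillRows n rest (rows.modify (PySem.Int.mod j n).toNat (fun r => r ++ [String.ofList [c]]))

def textToMatrix_alt (n : Int) (text : String) : List (List String) :=
  if n ≤ 0 then []
  else pvFillRows n (PySem.List.enumerate text.toList) (List.replicate n.toNat [])

-- ===== PRECONDITION & SPEC =====
def Spec_textToMatrix (n : Int) (text : String) (out : List (List String)) : Prop := out = textToMatrix_alt n text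
instance (n : Int) (text : String) (out : List (List String)) : Decidable (Spec_textToMatrix n text out) := by unfold Spec_textToMatrix; infer_instance

-- ===== CLAIM (what is proved, stated in full; the proofs are below) =====
def Claim_equal_textToMatrix : Prop := ∀ (n : Int) (text : String), Dom_textToMatrix n text → Spec_textToMatrix n text (textToMatrix n text)

-- ===== LEMMAS AND PROOFS =====

-- B's loop, characterised: each bucket k of rows gains the chars whose index j has (j % n).toNat = k
lemma pvFillRows_eq (n : Int) :
    ∀ (ps : List (Int × Char)) (rows : List (List String)),
      pvFillRows n ps rows = (List.range rows.length).map (fun k =>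
        rows.getD k [] ++ (ps.filter (fun p => (PySem.Int.mod p.1 n).toNat == k)).map
          (fun p => String.ofList [p.2])) := by
  intro ps
  induction ps with
  | nil =>
      intro rows
      simp [pvFillRows]
      apply List.ext_getElem
      · simp
      · intro i p _
        simp [List.getElem?_eq_getElem p]
  | cons p rest ih =>
      intro rows
      obtain ⟨j, c⟩ := p
      rw [pvFillRows, ih]
      rw [List.length_modify]
      apply List.map_congr_left
      intro k hk
      simp only [List.mem_range] at hk
      simp only [List.filter_cons]
      by_cases h : (PySem.Int.mod j n).toNat = k
      · have hlt : (PySem.Int.mod j n).toNat < rows.length := h ▸ hk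
        rw [List.getD_eq_getElem _ _ (by simpa using hk),
            List.getD_eq_getElem _ _ hk, List.getElem_modify]
        simp [h, List.append_assoc]
      · have hb : ((PySem.Int.mod j n).toNat == k) = false := by simpa using h
        rw [List.getD_eq_getElem _ _ (by simpa using hk),
            List.getD_eq_getElem _ _ hk, List.getElem_modify]
        simp [h, hb]

theorem textToMatrix_spec : Claim_equal_textToMatrix := by
  intro n text _
  unfold Spec_textToMatrix textToMatrix textToMatrix_alt
  by_cases hn : n ≤ 0
  · rw [PySem.List.pyRange_one_eq_nil hn]
    simp [hn]
  · rw [if_neg hn]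
    replace hn : 0 < n := by omega
    rw [pvFillRows_eq, List.length_replicate]
    rw [PySem.List.foldl_append_singleton_eq_map, List.nil_append]
    rw [PySem.List.pyRange_one 0 n]
    simp only [Int.sub_zero]
    rw [List.map_map]
    apply List.map_congr_left
    intro k hk
    simp only [List.mem_range] at hk
    simp only [Function.comp_def, zero_add]
    simp only [PySem.List.enumerate_eq_map_pyRange text.toList ' ', List.filter_map,
      List.map_map, Function.comp_def]
    rw [PySem.List.foldl_append_if, List.nil_append]
    have hfil : (PySem.List.pyRange 0 (PySem.Str.len text) 1).filter
          (fun j => PySem.Int.mod j n == (k : Int))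
        = (PySem.List.pyRange 0 (PySem.List.len text.toList) 1).filter
          (fun j => (PySem.Int.mod j n).toNat == k) := by
      rw [show PySem.Str.len text = PySem.List.len text.toList from rfl]
      apply List.filter_congr
      intro j hj
      have h0 : 0 ≤ PySem.Int.mod j n := PySem.Int.mod_nonneg j hn
      by_cases h : PySem.Int.mod j n = (k : Int)
      · simp [h]
      · have h2 : (PySem.Int.mod j n).toNat ≠ k := by omega
        simp [h, h2]
    rw [hfil, List.getD_eq_getElem _ _ (by simpa using hk), List.getElem_replicate,
      List.nil_append]
    apply List.map_congr_left
    intro j hj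
    have hj' : j ∈ PySem.List.pyRange 0 (PySem.List.len text.toList) 1 :=
      List.mem_of_mem_filter hj
    rw [PySem.List.mem_pyRange_one] at hj'
    simp only [PySem.List.len_eq] at hj'
    have hlt : j < (text.toList.length : Int) := hj'.2
    have hget : PySem.Str.pyGet? text j = some (text.toList[j.toNat]'(by omega)) := by
      rw [show PySem.Str.pyGet? text j = PySem.List.pyGet? text.toList j from rfl]
      exact PySem.List.pyGet?_eq_some_getElem text.toList hj'.1 hlt
    rw [hget, PySem.List.pyGetD_eq_getElem text.toList ' ' hj'.1 hlt]
    rfl
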